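-- pv_equiv track=rewrite | github.com/ayeshamaqsood8100-cmd/Exam-Monitor | backend/services/analyze_service.py | apply_backspaces
-- ===== SOURCE A (Python) =====
-- def apply_backspaces(texts: list[str]) -> list[str]:
--     result: list[str] = []
--     for char in texts:
--         if char == "[BS]":
--             if result:
--                 result.pop()
--         else:
--             result.append(char)
--     return result
-- ===== SOURCE B (Python) =====
-- def apply_backspaces(texts: list[str]) -> list[str]:
--     skip = 0
--     kept: list[str] = []
--     for char in reversed(texts):
--         if char == "[BS]":
--             skip += 1
--         elif skip > 0:
--             skip -= 1
--         else:
--             kept.append(char)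
--     kept.reverse()
--     return kept
-- ===== Notes on version B (the rewrite author's own statement) =====
-- stated objective: alternative
-- what changed: Scans the tokens right-to-left with an integer skip counter instead of left-to-right with a pop/append stack, then reverses the kept tokens.
import Mathlib
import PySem

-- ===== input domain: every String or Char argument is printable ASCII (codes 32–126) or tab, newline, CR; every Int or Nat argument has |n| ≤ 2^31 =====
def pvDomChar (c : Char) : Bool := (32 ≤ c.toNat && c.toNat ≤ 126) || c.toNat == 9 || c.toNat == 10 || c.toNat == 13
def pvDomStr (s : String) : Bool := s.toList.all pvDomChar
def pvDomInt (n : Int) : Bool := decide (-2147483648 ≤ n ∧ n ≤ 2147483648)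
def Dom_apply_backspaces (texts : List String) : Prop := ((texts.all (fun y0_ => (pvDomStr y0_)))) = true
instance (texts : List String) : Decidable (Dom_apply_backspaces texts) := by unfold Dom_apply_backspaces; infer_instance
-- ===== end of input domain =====

-- B replaces A's left-to-right append/pop stack by a right-to-left scan with an integer skip counter (objective: alternative, same cost).

-- ===== PORT A =====
def apply_backspaces (texts : List String) : List String :=
  texts.foldl
    (fun result char =>
      if char = "[BS]" then (if result.isEmpty then result else result.dropLast)
      else result ++ [char])
    []

-- ===== PORT B =====
-- the `for char in reversed(texts)` loop of Source B (skip counter, kept accumulator)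
def pvBsLoop (l : List String) (skip : Nat) (kept : List String) : List String :=
  match l with
  | [] => kept
  | char :: rest =>
      if char = "[BS]" then pvBsLoop rest (skip + 1) kept
      else if skip > 0 then pvBsLoop rest (skip - 1) kept
      else pvBsLoop rest skip (kept ++ [char])

def apply_backspaces_alt (texts : List String) : List String :=
  (pvBsLoop texts.reverse 0 []).reverse

-- ===== PRECONDITION & SPEC =====
def Spec_apply_backspaces (texts : List String) (out : List String) : Prop := out = apply_backspaces_alt texts
instance (texts : List String) (out : List String) : Decidable (Spec_apply_backspaces texts out) := by unfold Spec_apply_backspaces; infer_instance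

-- ===== CLAIM (what is proved, stated in full; the proofs are below) =====
def Claim_equal_apply_backspaces : Prop := ∀ (texts : List String), Dom_apply_backspaces texts → Spec_apply_backspaces texts (apply_backspaces texts)

-- ===== LEMMAS AND PROOFS =====

-- kept tokens of the right-to-left scan with the accumulator stripped off
def pvKeep (l : List String) (skip : Nat) : List String :=
  match l with
  | [] => []
  | char :: rest =>
      if char = "[BS]" then pvKeep rest (skip + 1)
      else if skip > 0 then pvKeep rest (skip - 1)
      else char :: pvKeep rest skip

theorem pvBsLoop_eq_keep (l : List String) (skip : Nat) (kept : List String) :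
    pvBsLoop l skip kept = kept ++ pvKeep l skip := by
  induction l generalizing skip kept with
  | nil => simp [pvBsLoop, pvKeep]
  | cons c rest ih =>
      simp only [pvBsLoop, pvKeep]
      split_ifs <;> simp [ih]

-- Main invariant: the reversed kept list with `skip` pending backspaces equals
-- A's stack after processing the same prefix, with `skip` elements dropped from its end.
theorem pvKeep_reverse (l : List String) (skip : Nat) :
    (pvKeep l.reverse skip).reverse = List.dropLast^[skip] (apply_backspaces l) := by
  induction l using List.reverseRecOn generalizing skip with
  | nil =>
      simp only [List.reverse_nil, pvKeep, List.reverse_nil, apply_backspaces, List.foldl_nil]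
      exact (Function.iterate_fixed (by simp) skip).symm
  | append_singleton l c ih =>
      have hA : apply_backspaces (l ++ [c])
          = (if c = "[BS]" then (apply_backspaces l).dropLast
             else apply_backspaces l ++ [c]) := by
        simp only [apply_backspaces, List.foldl_append, List.foldl_cons, List.foldl_nil]
        split_ifs <;> simp_all
      rw [hA, List.reverse_append]
      simp only [List.reverse_singleton, List.singleton_append, pvKeep]
      split_ifs with h1 h2
      · -- c = "[BS]"
        rw [ih (skip + 1)]
        simp [Function.iterate_succ_apply]
      · -- skip > 0
        obtain ⟨k, rfl⟩ : ∃ k, skip = k + 1 := ⟨skip - 1, by omega⟩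
        simp only [Nat.add_sub_cancel]
        rw [ih k]
        simp [Function.iterate_succ_apply]
      · -- skip = 0
        have h0 : skip = 0 := by omega
        subst h0
        simp [ih 0]

-- ===== VERDICT (by name: the statement is the Claim_ definition above) =====
theorem apply_backspaces_spec : Claim_equal_apply_backspaces := by
  intro texts _
  unfold Spec_apply_backspaces apply_backspaces_alt
  rw [pvBsLoop_eq_keep, List.nil_append, pvKeep_reverse]
  simp
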